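-- pv_equiv track=rewrite | github.com/DeividasLT5/Bioinformatika | Pirma.py | buildFrames
-- ===== SOURCE A (Python) =====
-- def buildFrames(dnr):
--     frame1Segments = []
--     frame2Segments = []
--     frame3Segments = []
--     frames = []
--     for readingFrame in [0, 1, 2]:
--         position = 0
--         for x in dnr:
--             segment = dnr[readingFrame:][position:position+3]
--             position = position + 3
--             if segment == "":
--                 break
--             if  readingFrame == 0:
--                 frame1Segments.append(segment)
--             elif readingFrame == 1:
--                 frame2Segments.append(segment)
--             else:
--                 frame3Segments.append(segment)
--     frames.append(frame1Segments)
--     frames.append(frame2Segments)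
--     frames.append(frame3Segments)
--     return frames
-- ===== SOURCE B (Python) =====
-- def buildFrames(dnr):
--     frames = [[], [], []]
--     for p in range(len(dnr)):
--         frames[p % 3].append(dnr[p:p+3])
--     return frames
-- ===== Notes on version B (the rewrite author's own statement) =====
-- stated objective: faster
-- what changed: Replaces A's three separate per-frame passes (each re-building the dnr[frame:] suffix copy on every character before slicing) with one single pass over all positions that dispatches each 3-char window dnr[p:p+3] to frame p % 3.
import Mathlib
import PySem

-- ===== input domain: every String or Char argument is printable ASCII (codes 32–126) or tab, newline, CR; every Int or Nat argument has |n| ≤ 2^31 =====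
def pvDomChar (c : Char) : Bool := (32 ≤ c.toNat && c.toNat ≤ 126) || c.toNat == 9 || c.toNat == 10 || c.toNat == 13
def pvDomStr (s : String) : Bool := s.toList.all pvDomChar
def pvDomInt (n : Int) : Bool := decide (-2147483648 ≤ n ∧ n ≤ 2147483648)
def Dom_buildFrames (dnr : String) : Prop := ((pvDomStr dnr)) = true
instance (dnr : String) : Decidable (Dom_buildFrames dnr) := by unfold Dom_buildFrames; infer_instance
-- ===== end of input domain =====

-- B replaces A's three per-frame re-slicing passes by one pass dispatching each window dnr[p:p+3] to frame p % 3 (simpler; same results).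

-- ===== PORT A =====
-- inner 'for x in dnr' loop of A for one reading frame: sub = dnr[readingFrame:]; position steps by 3; break on empty slice
def pvFrameA (sub : List Char) : List Char → Int → List String
  | [], _ => []
  | _ :: rest, position =>
    let segment := PySem.List.slice sub (some position) (some (position + 3))
    if segment = [] then []
    else String.ofList segment :: pvFrameA sub rest (position + 3)

def buildFrames (dnr : String) : List (List String) :=
  let s := dnr.toList
  -- 'for readingFrame in [0, 1, 2]' appending into the frame1/frame2/frame3 segment lists
  let r := [(0 : Int), 1, 2].foldl
    (fun (acc : List String × List String × List String) readingFrame =>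
      let segs := pvFrameA (PySem.List.slice s (some readingFrame) none) s 0
      if readingFrame = 0 then (acc.1 ++ segs, acc.2.1, acc.2.2)
      else if readingFrame = 1 then (acc.1, acc.2.1 ++ segs, acc.2.2)
      else (acc.1, acc.2.1, acc.2.2 ++ segs))
    ([], [], [])
  [r.1, r.2.1, r.2.2]

-- ===== PORT B =====
def buildFrames_alt (dnr : String) : List (List String) :=
  let s := dnr.toList
  -- 'for p in range(len(dnr)): frames[p % 3].append(dnr[p:p+3])'
  let r := (PySem.List.pyRange 0 (PySem.List.len s) 1).foldl
    (fun (acc : List String × List String × List String) p =>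
      let seg := String.ofList (PySem.List.slice s (some p) (some (p + 3)))
      if PySem.Int.mod p 3 = 0 then (acc.1 ++ [seg], acc.2.1, acc.2.2)
      else if PySem.Int.mod p 3 = 1 then (acc.1, acc.2.1 ++ [seg], acc.2.2)
      else (acc.1, acc.2.1, acc.2.2 ++ [seg]))
    ([], [], [])
  [r.1, r.2.1, r.2.2]

-- ===== PRECONDITION & SPEC =====
def Spec_buildFrames (dnr : String) (out : List (List String)) : Prop := out = buildFrames_alt dnr
instance (dnr : String) (out : List (List String)) : Decidable (Spec_buildFrames dnr out) := by unfold Spec_buildFrames; infer_instance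

-- ===== CLAIM (what is proved, stated in full; the proofs are below) =====
def Claim_equal_buildFrames : Prop := ∀ (dnr : String), Dom_buildFrames dnr → Spec_buildFrames dnr (buildFrames dnr)

-- ===== LEMMAS AND PROOFS =====

-- common characterisation both ports are reduced to: split into 3-char chunks
def pvChunks : List Char → List String
  | [] => []
  | [a] => [String.ofList [a]]
  | [a, b] => [String.ofList [a, b]]
  | a :: b :: c :: t => String.ofList [a, b, c] :: pvChunks t

def pvSeg (s : List Char) (p : Nat) : String := String.ofList ((s.drop p).take 3)

lemma pvChunks_ne_nil (l : List Char) (h : l ≠ []) :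
    pvChunks l = String.ofList (l.take 3) :: pvChunks (l.drop 3) := by
  match l with
  | [a] => rfl
  | [a, b] => rfl
  | a :: b :: c :: t => rfl

lemma pvChunks_eq_range' (s : List Char) :
    ∀ (k f : Nat), (s.length - f + 2) / 3 = k →
      pvChunks (s.drop f) = (List.range' f k 3).map (pvSeg s) := by
  intro k
  induction k with
  | zero =>
    intro f hk
    have : s.drop f = [] := by rw [List.drop_eq_nil_iff]; omega
    simp [this, pvChunks]
  | succ k ih =>
    intro f hk
    have hne : s.drop f ≠ [] := by rw [ne_eq, List.drop_eq_nil_iff]; omega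
    rw [pvChunks_ne_nil _ hne, List.range'_succ, List.map_cons, List.drop_drop,
      ih (f + 3) (by omega)]
    rfl

lemma pvFilter_range_eq_range' :
    ∀ (n f : Nat), f < 3 →
      (List.range n).filter (fun p => p % 3 == f) = List.range' f ((n - f + 2) / 3) 3 := by
  intro n
  induction n with
  | zero =>
    intro f hf
    simp
  | succ n ih =>
    intro f hf
    rw [List.range_succ, List.filter_append, ih f hf]
    by_cases h : n % 3 = f
    · have hc : (n + 1 - f + 2) / 3 = (n - f + 2) / 3 + 1 := by omega
      have hn : f + 3 * ((n - f + 2) / 3) = n := by omega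
      simp [h, hc, List.range'_concat, hn]
    · have hc : (n + 1 - f + 2) / 3 = (n - f + 2) / 3 := by omega
      simp [h, hc]

-- A's inner loop produces exactly the chunks of sub (dnr is long enough that the break always fires first)
lemma pvFrameA_eq_chunks (sub : List Char) :
    ∀ (iter : List Char) (j : Nat), sub.length ≤ 3 * j + 3 * iter.length →
      pvFrameA sub iter (3 * (j : Int)) = pvChunks (sub.drop (3 * j)) := by
  intro iter
  induction iter with
  | nil =>
    intro j h
    have hd : sub.drop (3 * j) = [] := by
      rw [List.drop_eq_nil_iff]; simp at h; omega
    simp [pvFrameA, hd, pvChunks]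
  | cons a rest ih =>
    intro j h
    have hseg : PySem.List.slice sub (some (3 * (j : Int))) (some (3 * (j : Int) + 3)) =
        (sub.drop (3 * j)).take 3 := by
      have h2 : (3 * (j : Int)) + 3 = ((3 * j : Nat) : Int) + ((3 : Nat) : Int) := by push_cast; ring
      have h1 : (3 * (j : Int)) = ((3 * j : Nat) : Int) := by push_cast; ring
      rw [h2, h1, PySem.List.slice_natCast_add]
    have h' : sub.length ≤ 3 * (j + 1) + 3 * rest.length := by
      simp only [List.length_cons] at h; omega
    by_cases hnil : sub.drop (3 * j) = []
    · simp [pvFrameA, hseg, hnil, pvChunks]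
    · have htk : (sub.drop (3 * j)).take 3 ≠ [] := by
        rw [ne_eq, List.take_eq_nil_iff]; simp [hnil]
      have h31 : 3 * (j : Int) + 3 = 3 * ((j + 1 : Nat) : Int) := by push_cast; ring
      have h32 : 3 * j + 3 = 3 * (j + 1) := by ring
      rw [pvChunks_ne_nil _ hnil, List.drop_drop, h32]
      simp only [pvFrameA]
      rw [hseg, if_neg htk, h31, ih (j + 1) h']

-- B's fold over positions 0..n-1 collects, per frame f, the segments at positions ≡ f (mod 3)
lemma pvBloop (s : List Char) :
    ∀ (n : Nat),
      ((List.range n).map (fun (k : Nat) => (k : Int))).foldl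
        (fun (acc : List String × List String × List String) p =>
          let seg := String.ofList (PySem.List.slice s (some p) (some (p + 3)))
          if PySem.Int.mod p 3 = 0 then (acc.1 ++ [seg], acc.2.1, acc.2.2)
          else if PySem.Int.mod p 3 = 1 then (acc.1, acc.2.1 ++ [seg], acc.2.2)
          else (acc.1, acc.2.1, acc.2.2 ++ [seg]))
        ([], [], [])
      = (((List.range n).filter (fun p => p % 3 == 0)).map (pvSeg s),
         ((List.range n).filter (fun p => p % 3 == 1)).map (pvSeg s),
         ((List.range n).filter (fun p => p % 3 == 2)).map (pvSeg s)) := by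
  intro n
  induction n with
  | zero => simp
  | succ n ih =>
    rw [List.range_succ, List.map_append, List.foldl_append, ih]
    have hmod : PySem.Int.mod ((n : Nat) : Int) 3 = ((n % 3 : Nat) : Int) := by
      exact_mod_cast PySem.Int.mod_natCast n 3
    have hseg : PySem.List.slice s (some ((n : Nat) : Int)) (some (((n : Nat) : Int) + 3)) =
        (s.drop n).take 3 := by
      have h3 : ((n : Nat) : Int) + 3 = ((n : Nat) : Int) + ((3 : Nat) : Int) := by norm_num
      rw [h3, PySem.List.slice_natCast_add]
    simp only [List.map_cons, List.map_nil, List.foldl_cons, List.foldl_nil, hmod, hseg,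
      List.filter_append, List.filter_cons, List.filter_nil, List.map_append]
    have h3 : n % 3 = 0 ∨ n % 3 = 1 ∨ n % 3 = 2 := by omega
    rcases h3 with h | h | h <;> simp [h, pvSeg]

lemma pvFrames_agree (s : List Char) (f : Nat) (hf : f < 3) :
    ((List.range s.length).filter (fun p => p % 3 == f)).map (pvSeg s) = pvChunks (s.drop f) := by
  rw [pvFilter_range_eq_range' s.length f hf,
    pvChunks_eq_range' s ((s.length - f + 2) / 3) f rfl]

lemma pvA_frame (s : List Char) (f : Nat) :
    pvFrameA (s.drop f) s 0 = pvChunks (s.drop f) := by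
  have h := pvFrameA_eq_chunks (s.drop f) s 0 (by simp; omega)
  simpa using h

lemma pvA_triple (dnr : String) :
    buildFrames dnr = [pvChunks dnr.toList, pvChunks (dnr.toList.drop 1), pvChunks (dnr.toList.drop 2)] := by
  have s1 : PySem.List.slice dnr.toList (some (1 : Int)) none = dnr.toList.drop 1 := by
    simpa using PySem.List.slice_from_natCast dnr.toList 1
  have s2 : PySem.List.slice dnr.toList (some (2 : Int)) none = dnr.toList.drop 2 := by
    simpa using PySem.List.slice_from_natCast dnr.toList 2
  simp only [buildFrames, List.foldl_cons, List.foldl_nil]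
  norm_num [s1, s2]
  refine ⟨?_, ?_, ?_⟩
  · simpa using pvA_frame dnr.toList 0
  · simpa using pvA_frame dnr.toList 1
  · simpa using pvA_frame dnr.toList 2

lemma pvB_triple (dnr : String) :
    buildFrames_alt dnr = [pvChunks dnr.toList, pvChunks (dnr.toList.drop 1), pvChunks (dnr.toList.drop 2)] := by
  simp only [buildFrames_alt]
  have hrange : PySem.List.pyRange 0 (PySem.List.len dnr.toList) 1 =
      (List.range dnr.toList.length).map (fun (k : Nat) => (k : Int)) := by
    simp [PySem.List.pyRange_one, PySem.List.len]
  rw [hrange, pvBloop dnr.toList dnr.toList.length]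
  have g0 := pvFrames_agree dnr.toList 0 (by omega)
  have g1 := pvFrames_agree dnr.toList 1 (by omega)
  have g2 := pvFrames_agree dnr.toList 2 (by omega)
  simp only [List.drop_zero] at g0
  rw [g0, g1, g2]

-- ===== VERDICT (by name: the statement is the Claim_ definition above) =====
theorem buildFrames_spec : Claim_equal_buildFrames := by
  intro dnr _
  unfold Spec_buildFrames
  rw [pvA_triple, pvB_triple]
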